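-- pv_equiv track=rewrite | github.com/edwinlopezl/MinorityGame_UR_MACC | OptiClass.py | audit_freq
-- ===== SOURCE A (Python) =====
-- def audit_freq(p, q):
--     a = []
--     b = []
--
--     juntando = False
--
--     for i in range(len(p)):
--         if not juntando and (p[i] == 0 or q[i] == 0):
--             temp_a = 0
--             temp_b = 0
--             juntando = True
--         elif not juntando:
--             a.append(p[i])
--             b.append(q[i])
--
--         if juntando:
--             temp_a += p[i]
--             temp_b += q[i]
--             if temp_a * temp_b != 0:
--                 juntando = False
--                 a.append(temp_a)
--                 b.append(temp_b)
--
--     return a, b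
-- ===== SOURCE B (Python) =====
-- def take_nonzero(rest):
--     # length of the leading block of pairs with both components nonzero
--     k = 0
--     for x, y in rest:
--         if x == 0 or y == 0:
--             break
--         k += 1
--     return k
--
--
-- def find_run(rest):
--     # shortest prefix of rest whose componentwise sums are both nonzero;
--     # returns (length, sum_a, sum_b), or None if no prefix closes the run
--     ta = tb = 0
--     k = 0
--     for x, y in rest:
--         ta += x
--         tb += y
--         k += 1
--         if ta * tb != 0:
--             return (k, ta, tb)
--     return None
--
--
-- def audit_freq(p, q):
--     pairs = [(p[i], q[i]) for i in range(len(p))]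
--     # phase 1: cut the pair sequence into self-contained segments
--     segs = []
--     rest = pairs
--     while rest:
--         if rest[0][0] != 0 and rest[0][1] != 0:
--             k = take_nonzero(rest)
--             segs.append((rest[:k], False))
--         else:
--             r = find_run(rest)
--             if r is None:
--                 break  # unfinished trailing run produces no segment
--             k = r[0]
--             segs.append((rest[:k], True))
--         rest = rest[k:]
--     # phase 2: emit each segment (merged segments as componentwise sums)
--     a = []
--     b = []
--     for seg, merged in segs:
--         if merged:
--             a.append(sum(x for x, _ in seg))
--             b.append(sum(y for _, y in seg))
--         else:
--             a.extend(x for x, _ in seg)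
--             b.extend(y for _, y in seg)
--     return (a, b)
-- ===== Notes on version B (the rewrite author's own statement) =====
-- stated objective: alternative
-- what changed: A's single stateful pass with a 'juntando' flag and running temps is replaced by two staged passes: a segmentation pass that cuts the zipped sequence into self-contained segments (maximal nonzero blocks, and shortest zero-run prefixes whose componentwise sums are both nonzero), then an emission pass that outputs plain segments element-wise and merged segments as sums.
import Mathlib
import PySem

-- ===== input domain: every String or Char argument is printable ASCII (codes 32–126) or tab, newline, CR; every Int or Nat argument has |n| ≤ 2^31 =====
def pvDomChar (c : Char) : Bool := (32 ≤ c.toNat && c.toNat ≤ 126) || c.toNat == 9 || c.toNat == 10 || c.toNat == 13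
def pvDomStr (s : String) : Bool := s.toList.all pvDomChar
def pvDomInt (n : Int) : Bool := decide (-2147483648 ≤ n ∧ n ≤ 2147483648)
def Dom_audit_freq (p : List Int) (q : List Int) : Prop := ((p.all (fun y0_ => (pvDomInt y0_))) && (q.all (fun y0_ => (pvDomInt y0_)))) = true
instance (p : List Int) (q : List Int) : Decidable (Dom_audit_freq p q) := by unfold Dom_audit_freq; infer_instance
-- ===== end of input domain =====

-- B replaces A's single stateful pass (flag + running temps) by two staged passes:
-- a segmentation pass cutting the zipped pairs into self-contained segments, then
-- an emission pass printing plain segments element-wise and merged ones as sums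
-- (objective: alternative decomposition; same O(n) cost).

-- ===== PORT A =====
-- state: (a, b, juntando, temp_a, temp_b); temps initialised 0 (never read before set in Python)
def auditStepA (p : List Int) (q : List Int)
    (s : List Int × List Int × Bool × Int × Int) (i : Nat) :
    List Int × List Int × Bool × Int × Int :=
  let x := PySem.List.pyGetD p (i : Int) 0
  let y := PySem.List.pyGetD q (i : Int) 0
  let (a, b, j, ta, tb) := s
  let (a, b, j, ta, tb) :=
    if !j && (x == 0 || y == 0) then (a, b, true, (0 : Int), (0 : Int))
    else if !j then (a ++ [x], b ++ [y], j, ta, tb)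
    else (a, b, j, ta, tb)
  if j then
    let ta := ta + x
    let tb := tb + y
    if ta * tb ≠ 0 then (a ++ [ta], b ++ [tb], false, ta, tb)
    else (a, b, j, ta, tb)
  else (a, b, j, ta, tb)

def audit_freq (p : List Int) (q : List Int) : List Int × List Int :=
  let s := (List.range p.length).foldl (auditStepA p q) ([], [], false, 0, 0)
  (s.1, s.2.1)

-- ===== PORT B =====
-- take_nonzero: length of the leading block of pairs with both components nonzero
def takeNZ : List (Int × Int) → Nat
  | [] => 0
  | (x, y) :: t => if x = 0 ∨ y = 0 then 0 else takeNZ t + 1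

-- find_run: shortest prefix whose componentwise sums are both nonzero (length, sums), else none
def findRun : List (Int × Int) → Int → Int → Nat → Option (Nat × Int × Int)
  | [], _, _, _ => none
  | (x, y) :: t, ta, tb, k =>
      if (ta + x) * (tb + y) ≠ 0 then some (k + 1, ta + x, tb + y)
      else findRun t (ta + x) (tb + y) (k + 1)

-- termination facts for the segmentation loop (cited by bSegs's decreasing_by)
lemma takeNZ_cons_pos {x y : Int} (t : List (Int × Int)) (h : ¬ (x = 0 ∨ y = 0)) :
    takeNZ ((x, y) :: t) = takeNZ t + 1 := by simp [takeNZ, h]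

lemma findRun_some_lt : ∀ (l : List (Int × Int)) (ta tb : Int) (k0 k : Nat) (ta' tb' : Int),
    findRun l ta tb k0 = some (k, ta', tb') → k0 < k ∧ k ≤ k0 + l.length := by
  intro l
  induction l with
  | nil => intro ta tb k0 k ta' tb' h; simp [findRun] at h
  | cons xy t ih =>
    obtain ⟨x, y⟩ := xy
    intro ta tb k0 k ta' tb' h
    by_cases hp : (ta + x) * (tb + y) ≠ 0
    · rw [findRun, if_pos hp] at h
      simp only [Option.some.injEq, Prod.mk.injEq] at h
      simp only [List.length_cons]
      omega
    · rw [findRun, if_neg hp] at h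
      have := ih (ta + x) (tb + y) (k0 + 1) k ta' tb' h
      simp only [List.length_cons]; omega

-- phase 1: cut into segments (list of (segment, merged?))
def bSegs : List (Int × Int) → List (List (Int × Int) × Bool)
  | [] => []
  | (x, y) :: t =>
      if hx : x ≠ 0 ∧ y ≠ 0 then
        (((x, y) :: t).take (takeNZ ((x, y) :: t)), false)
          :: bSegs (((x, y) :: t).drop (takeNZ ((x, y) :: t)))
      else
        match hr : findRun ((x, y) :: t) 0 0 0 with
        | none => []
        | some (k, _, _) =>
            (((x, y) :: t).take k, true) :: bSegs (((x, y) :: t).drop k)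
  termination_by l => l.length
  decreasing_by
  · have hk : takeNZ ((x, y) :: t) = takeNZ t + 1 :=
      takeNZ_cons_pos t (by rcases hx with ⟨h1, h2⟩; simp [h1, h2])
    simp [hk]
  · have := findRun_some_lt ((x, y) :: t) 0 0 0 k _ _ hr
    simp only [List.length_cons] at this ⊢
    simp; omega

-- phase 2: emit each segment (merged segments as componentwise sums)
def bEmit : List (List (Int × Int) × Bool) → List Int → List Int → List Int × List Int
  | [], a, b => (a, b)
  | (seg, merged) :: s, a, b =>
      if merged then
        bEmit s (a ++ [(seg.map Prod.fst).sum]) (b ++ [(seg.map Prod.snd).sum])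
      else bEmit s (a ++ seg.map Prod.fst) (b ++ seg.map Prod.snd)

def audit_freq_alt (p : List Int) (q : List Int) : List Int × List Int :=
  let pairs := (List.range p.length).map
    (fun (i : Nat) => (PySem.List.pyGetD p (i : Int) 0, PySem.List.pyGetD q (i : Int) 0))
  bEmit (bSegs pairs) [] []

-- ===== PRECONDITION & SPEC =====
-- A evaluates q[i] for every i < len(p); it raises IndexError iff len(q) < len(p)
def Pre_audit_freq (p : List Int) (q : List Int) : Prop := p.length ≤ q.length
instance (p : List Int) (q : List Int) : Decidable (Pre_audit_freq p q) := by
  unfold Pre_audit_freq; infer_instance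

def pvWitness_audit_freq : List Int × List Int := ([1, 0, 2], [3, 4, 5])

def Spec_audit_freq (p : List Int) (q : List Int) (out : List Int × List Int) : Prop :=
  out = audit_freq_alt p q
instance (p : List Int) (q : List Int) (out : List Int × List Int) :
    Decidable (Spec_audit_freq p q out) := by unfold Spec_audit_freq; infer_instance

-- ===== CLAIM =====
def Claim_equal_audit_freq : Prop :=
  ∀ (p : List Int) (q : List Int), Dom_audit_freq p q → Pre_audit_freq p q →
    Spec_audit_freq p q (audit_freq p q)

-- ===== LEMMAS AND PROOFS =====

lemma pyGetD_cast_succ (x : Int) (p : List Int) (i : Nat) :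
    PySem.List.pyGetD (x :: p) (((i + 1 : Nat)) : Int) 0 = PySem.List.pyGetD p (i : Int) 0 := by
  rw [PySem.List.pyGetD_natCast, PySem.List.pyGetD_natCast]
  simp [List.getD]

-- the per-pair core of A's loop body
def auditStepZ (s : List Int × List Int × Bool × Int × Int) (xy : Int × Int) :
    List Int × List Int × Bool × Int × Int :=
  let (x, y) := xy
  let (a, b, j, ta, tb) := s
  let (a, b, j, ta, tb) :=
    if !j && (x == 0 || y == 0) then (a, b, true, (0 : Int), (0 : Int))
    else if !j then (a ++ [x], b ++ [y], j, ta, tb)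
    else (a, b, j, ta, tb)
  if j then
    let ta := ta + x
    let tb := tb + y
    if ta * tb ≠ 0 then (a ++ [ta], b ++ [tb], false, ta, tb)
    else (a, b, j, ta, tb)
  else (a, b, j, ta, tb)

lemma foldA_eq_foldZip (p q : List Int) (h : p.length ≤ q.length)
    (s : List Int × List Int × Bool × Int × Int) :
    (List.range p.length).foldl (auditStepA p q) s = (p.zip q).foldl auditStepZ s := by
  induction p generalizing q s with
  | nil => simp
  | cons x p ih =>
    cases q with
    | nil => simp at h
    | cons y q =>
      simp only [List.length_cons] at h ⊢
      rw [List.range_succ_eq_map]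
      simp only [List.foldl_cons, List.foldl_map, List.zip_cons_cons]
      have hstep0 : auditStepA (x :: p) (y :: q) s 0 = auditStepZ s (x, y) := by
        simp [auditStepA, auditStepZ, PySem.List.pyGetD]
      rw [hstep0]
      have hcongr : (List.range p.length).foldl
          (fun s i => auditStepA (x :: p) (y :: q) s i.succ) (auditStepZ s (x, y))
          = (List.range p.length).foldl (auditStepA p q) (auditStepZ s (x, y)) := by
        apply PySem.List.foldl_congr_mem
        intro acc i hi
        simp only [List.mem_range] at hi
        simp only [auditStepA, Nat.succ_eq_add_one]
        rw [pyGetD_cast_succ x p i, pyGetD_cast_succ y q i]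
      rw [hcongr, ih q (by omega)]

lemma pairs_eq_zip (p q : List Int) (h : p.length ≤ q.length) :
    (List.range p.length).map
      (fun (i : Nat) => (PySem.List.pyGetD p (i : Int) 0, PySem.List.pyGetD q (i : Int) 0))
      = p.zip q := by
  induction p generalizing q with
  | nil => simp
  | cons x p ih =>
    cases q with
    | nil => simp at h
    | cons y q =>
      simp only [List.length_cons] at h ⊢
      rw [List.range_succ_eq_map, List.map_cons, List.map_map, List.zip_cons_cons]
      congr 1
      · simp [PySem.List.pyGetD]
      · rw [← ih q (by omega)]
        apply List.map_congr_left
        intro i _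
        simp only [Function.comp_apply, Nat.succ_eq_add_one]
        rw [pyGetD_cast_succ x p i, pyGetD_cast_succ y q i]

-- the false-state fold copies a leading block of nonzero pairs verbatim
lemma foldZ_nonzero_prefix : ∀ (l : List (Int × Int)) (a b : List Int) (ta tb : Int),
    l.foldl auditStepZ (a, b, false, ta, tb)
      = (l.drop (takeNZ l)).foldl auditStepZ
          (a ++ (l.take (takeNZ l)).map Prod.fst, b ++ (l.take (takeNZ l)).map Prod.snd,
           false, ta, tb) := by
  intro l
  induction l with
  | nil => simp [takeNZ]
  | cons xy t ih =>
    obtain ⟨x, y⟩ := xy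
    intro a b ta tb
    by_cases h : x = 0 ∨ y = 0
    · simp [takeNZ, h]
    · push_neg at h
      have hk : takeNZ ((x, y) :: t) = takeNZ t + 1 := by simp [takeNZ, h.1, h.2]
      have hstep : auditStepZ (a, b, false, ta, tb) (x, y)
          = (a ++ [x], b ++ [y], false, ta, tb) := by
        simp [auditStepZ, h.1, h.2]
      rw [List.foldl_cons, hstep, hk]
      simp only [List.take_succ_cons, List.drop_succ_cons, List.map_cons]
      rw [ih]
      simp [List.append_assoc]

lemma findRun_shift : ∀ (l : List (Int × Int)) (ta tb : Int) (k0 : Nat),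
    findRun l ta tb k0 = (findRun l ta tb 0).map (fun r => (r.1 + k0, r.2.1, r.2.2)) := by
  intro l
  induction l with
  | nil => intro ta tb k0; simp [findRun]
  | cons xy t ih =>
    obtain ⟨x, y⟩ := xy
    intro ta tb k0
    by_cases hp : (ta + x) * (tb + y) ≠ 0
    · rw [findRun, if_pos hp, findRun, if_pos hp]; simp; omega
    · rw [findRun, if_neg hp, findRun, if_neg hp, ih (ta + x) (tb + y) (k0 + 1),
        ih (ta + x) (tb + y) 1]
      cases findRun t (ta + x) (tb + y) 0 <;> simp <;> omega

-- behaviour of the true-state (merging) fold, matched against find_run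
lemma foldZ_merge : ∀ (l : List (Int × Int)) (ta tb : Int) (a b : List Int),
    (findRun l ta tb 0 = none →
      ∃ ta' tb', l.foldl auditStepZ (a, b, true, ta, tb) = (a, b, true, ta', tb'))
    ∧ (∀ (k : Nat) (ta' tb' : Int), findRun l ta tb 0 = some (k, ta', tb') →
        l.foldl auditStepZ (a, b, true, ta, tb)
          = (l.drop k).foldl auditStepZ (a ++ [ta'], b ++ [tb'], false, ta', tb')
        ∧ ta' = ta + ((l.take k).map Prod.fst).sum
        ∧ tb' = tb + ((l.take k).map Prod.snd).sum) := by
  intro l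
  induction l with
  | nil =>
    intro ta tb a b
    exact ⟨fun _ => ⟨ta, tb, by simp⟩, fun k ta' tb' h => by simp [findRun] at h⟩
  | cons xy t ih =>
    obtain ⟨x, y⟩ := xy
    intro ta tb a b
    by_cases hp : (ta + x) * (tb + y) ≠ 0
    · have hstep : auditStepZ (a, b, true, ta, tb) (x, y)
          = (a ++ [ta + x], b ++ [tb + y], false, ta + x, tb + y) := by
        simp [auditStepZ, hp]
      constructor
      · intro h; rw [findRun, if_pos hp] at h; exact absurd h (by simp)
      · intro k ta' tb' h
        rw [findRun, if_pos hp] at h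
        simp only [Nat.zero_add, Option.some.injEq, Prod.mk.injEq] at h
        obtain ⟨hk1, hk2, hk3⟩ := h
        subst hk1; subst hk2; subst hk3
        rw [List.foldl_cons, hstep]
        simp
    · have hstep : auditStepZ (a, b, true, ta, tb) (x, y)
          = (a, b, true, ta + x, tb + y) := by
        simp only [auditStepZ]; simp [hp]
      have hfr : findRun ((x, y) :: t) ta tb 0
          = (findRun t (ta + x) (tb + y) 0).map (fun r => (r.1 + 1, r.2.1, r.2.2)) := by
        rw [findRun, if_neg hp, findRun_shift]
      constructor
      · intro h
        rw [hfr] at h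
        have hnone : findRun t (ta + x) (tb + y) 0 = none := by
          cases hc : findRun t (ta + x) (tb + y) 0 <;> simp [hc] at h ⊢
        rw [List.foldl_cons, hstep]
        exact (ih (ta + x) (tb + y) a b).1 hnone
      · intro k ta' tb' h
        rw [hfr] at h
        cases hc : findRun t (ta + x) (tb + y) 0 with
        | none => rw [hc] at h; simp at h
        | some r =>
          obtain ⟨k', tA, tB⟩ := r
          rw [hc] at h
          simp only [Option.map_some, Option.some.injEq, Prod.mk.injEq] at h
          obtain ⟨hk, hA, hB⟩ := h
          subst hA hB
          obtain ⟨h1, h2, h3⟩ := (ih (ta + x) (tb + y) a b).2 k' tA tB hc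
          subst hk
          rw [List.foldl_cons, hstep]
          refine ⟨by rw [List.drop_succ_cons]; exact h1, ?_, ?_⟩ <;>
            simp only [List.take_succ_cons, List.map_cons, List.sum_cons] <;> omega

-- main invariant: the staged passes compute the projections of A's fold
lemma bMain : ∀ (n : Nat) (l : List (Int × Int)), l.length ≤ n →
    ∀ (a b : List Int) (ta tb : Int),
      bEmit (bSegs l) a b
        = ((l.foldl auditStepZ (a, b, false, ta, tb)).1,
           (l.foldl auditStepZ (a, b, false, ta, tb)).2.1) := by
  intro n
  induction n with
  | zero =>
    intro l hl a b ta tb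
    have : l = [] := List.length_eq_zero_iff.mp (Nat.le_zero.mp hl)
    subst this; simp [bSegs, bEmit]
  | succ n ih =>
    intro l hl a b ta tb
    cases l with
    | nil => simp [bSegs, bEmit]
    | cons xy t =>
      obtain ⟨x, y⟩ := xy
      by_cases hx : x ≠ 0 ∧ y ≠ 0
      · -- nonzero head: a plain segment of length takeNZ ≥ 1
        have hk : takeNZ ((x, y) :: t) = takeNZ t + 1 := by simp [takeNZ, hx.1, hx.2]
        rw [bSegs, dif_pos hx]
        rw [bEmit, if_neg (by simp)]
        rw [foldZ_nonzero_prefix ((x, y) :: t) a b ta tb]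
        apply ih
        rw [List.length_drop, hk]
        simp only [List.length_cons] at hl ⊢
        omega
      · -- zero head: enter merge mode with temps (x, y)
        have hstep : auditStepZ (a, b, false, ta, tb) (x, y) = (a, b, true, x, y) := by
          rcases (by tauto : x = 0 ∨ y = 0) with hz | hz <;>
            simp [auditStepZ, hz, mul_comm]
        have hfr : findRun ((x, y) :: t) 0 0 0
            = (findRun t x y 0).map (fun r => (r.1 + 1, r.2.1, r.2.2)) := by
          have hp : ¬ ((0 + x) * (0 + y) ≠ 0) := by
            rcases (by tauto : x = 0 ∨ y = 0) with hz | hz <;> simp [hz]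
          rw [findRun, if_neg hp, zero_add, zero_add, findRun_shift]
        rw [bSegs, dif_neg hx]
        rw [List.foldl_cons, hstep]
        cases hc : findRun t x y 0 with
        | none =>
          have hfr' : findRun ((x, y) :: t) 0 0 0 = none := by rw [hfr, hc]; rfl
          obtain ⟨tA, tB, hfin⟩ := (foldZ_merge t x y a b).1 hc
          split
          · rw [hfin]; simp [bEmit]
          · rename_i k ta' tb' hr; rw [hfr'] at hr; exact absurd hr (by simp)
        | some r =>
          obtain ⟨k', ta', tb'⟩ := r
          have hfr' : findRun ((x, y) :: t) 0 0 0 = some (k' + 1, ta', tb') := by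
            rw [hfr, hc]; rfl
          obtain ⟨h1, h2, h3⟩ := (foldZ_merge t x y a b).2 k' ta' tb' hc
          split
          · rename_i hr; rw [hfr'] at hr; exact absurd hr (by simp)
          · rename_i k ta'' tb'' hr
            rw [hfr'] at hr
            simp only [Option.some.injEq, Prod.mk.injEq] at hr
            obtain ⟨hrk, hrA, hrB⟩ := hr
            subst hrk
            rw [bEmit, if_pos rfl, h1]
            have hsum1 : ((((x, y) :: t).take (k' + 1)).map Prod.fst).sum = ta' := by
              simp only [List.take_succ_cons, List.map_cons, List.sum_cons]; omega
            have hsum2 : ((((x, y) :: t).take (k' + 1)).map Prod.snd).sum = tb' := by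
              simp only [List.take_succ_cons, List.map_cons, List.sum_cons]; omega
            rw [hsum1, hsum2]
            have hdrop : ((x, y) :: t).drop (k' + 1) = t.drop k' := by simp
            rw [hdrop]
            apply ih
            rw [List.length_drop]
            simp only [List.length_cons] at hl
            omega

-- ===== VERDICT =====
theorem audit_freq_spec : Claim_equal_audit_freq := by
  intro p q _ hpre
  unfold Spec_audit_freq audit_freq audit_freq_alt
  rw [foldA_eq_foldZip p q hpre, pairs_eq_zip p q hpre]
  exact (bMain (p.zip q).length (p.zip q) le_rfl [] [] 0 0).symm
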